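-- pv_equiv track=rewrite | github.com/navendugoyal19/datavault | scripts/ragl_campaign.py | build_longform_timeline_segments
-- ===== SOURCE A (Python) =====
-- from typing import Any
--
-- def milestone_indices(total: int, count: int) -> list[int]:
--     if total <= count:
--         return list(range(total))
--     raw = {
--         0,
--         total - 1,
--         *(round((total - 1) * step / (count - 1)) for step in range(count)),
--     }
--     return sorted(raw)
--
-- def build_longform_story_point_indices(data: dict[str, Any]) -> list[int]:
--     return milestone_indices(len(data["frames"]), 7)
--
-- def build_longform_timeline_segments(
--     data: dict[str, Any],
--     timing_lines: list[dict[str, Any]],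
--     intro_duration: int,
-- ) -> list[dict[str, int]]:
--     point_indices = build_longform_story_point_indices(data)
--     if not timing_lines:
--         return []
--
--     normalized_ranges: list[dict[str, int]] = []
--     previous_end = 0
--     for line in timing_lines:
--         raw_end = max(0, line["endFrame"] - intro_duration)
--         if raw_end <= previous_end:
--             continue
--         normalized_ranges.append(
--             {
--                 "startFrame": previous_end,
--                 "endFrame": raw_end,
--             }
--         )
--         previous_end = raw_end
--
--     if not normalized_ranges:
--         return []
--
--     segments: list[dict[str, int]] = []
--     opening_index = point_indices[0]
--     final_index = point_indices[-1]
--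
--     for range_index in range(min(2, len(normalized_ranges))):
--         window = normalized_ranges[range_index]
--         segments.append(
--             {
--                 "startFrame": window["startFrame"],
--                 "endFrame": window["endFrame"],
--                 "startIndex": opening_index,
--                 "endIndex": opening_index,
--             }
--         )
--
--     transition_offset = 2
--     transition_count = len(point_indices) - 1
--     for transition_index in range(transition_count):
--         range_index = transition_offset + transition_index
--         if range_index >= len(normalized_ranges):
--             break
--         window = normalized_ranges[range_index]
--         segments.append(
--             {
--                 "startFrame": window["startFrame"],
--                 "endFrame": window["endFrame"],
--                 "startIndex": point_indices[transition_index],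
--                 "endIndex": point_indices[transition_index + 1],
--             }
--         )
--
--     for range_index in range(transition_offset + transition_count, len(normalized_ranges)):
--         window = normalized_ranges[range_index]
--         segments.append(
--             {
--                 "startFrame": window["startFrame"],
--                 "endFrame": window["endFrame"],
--                 "startIndex": final_index,
--                 "endIndex": final_index,
--             }
--         )
--
--     return segments
-- ===== SOURCE B (Python) =====
-- from typing import Any
--
--
-- def milestone_indices(total: int, count: int) -> list[int]:
--     if total <= count:
--         return list(range(total))
--     raw = {
--         0,
--         total - 1,
--         *(round((total - 1) * step / (count - 1)) for step in range(count)),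
--     }
--     return sorted(raw)
--
--
-- def build_longform_story_point_indices(data: dict[str, Any]) -> list[int]:
--     return milestone_indices(len(data["frames"]), 7)
--
--
-- def build_longform_timeline_segments(
--     data: dict[str, Any],
--     timing_lines: list[dict[str, Any]],
--     intro_duration: int,
-- ) -> list[dict[str, int]]:
--     indices = build_longform_story_point_indices(data)
--
--     def assignment(k: int) -> tuple[int, int]:
--         # positional classification of the k-th emitted segment
--         if k < 2:
--             return indices[0], indices[0]
--         if k < 1 + len(indices):
--             return indices[k - 2], indices[k - 1]
--         return indices[-1], indices[-1]
--
--     segments: list[dict[str, int]] = []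
--     prev = 0
--     for line in timing_lines:
--         end = max(0, line["endFrame"] - intro_duration)
--         if end > prev:
--             a, b = assignment(len(segments))
--             segments.append(
--                 {"startFrame": prev, "endFrame": end, "startIndex": a, "endIndex": b}
--             )
--             prev = end
--     return segments
-- ===== Notes on version B (the rewrite author's own statement) =====
-- stated objective: alternative
-- what changed: A's four loops (a normalization pass building an intermediate range list, then three phased slice-loops over it) are fused into one streaming pass over timing_lines that never materializes the range list: each surviving range is emitted immediately as a segment whose index pair is computed by classifying the running segment count (opening / transition / final).
import Mathlib
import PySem

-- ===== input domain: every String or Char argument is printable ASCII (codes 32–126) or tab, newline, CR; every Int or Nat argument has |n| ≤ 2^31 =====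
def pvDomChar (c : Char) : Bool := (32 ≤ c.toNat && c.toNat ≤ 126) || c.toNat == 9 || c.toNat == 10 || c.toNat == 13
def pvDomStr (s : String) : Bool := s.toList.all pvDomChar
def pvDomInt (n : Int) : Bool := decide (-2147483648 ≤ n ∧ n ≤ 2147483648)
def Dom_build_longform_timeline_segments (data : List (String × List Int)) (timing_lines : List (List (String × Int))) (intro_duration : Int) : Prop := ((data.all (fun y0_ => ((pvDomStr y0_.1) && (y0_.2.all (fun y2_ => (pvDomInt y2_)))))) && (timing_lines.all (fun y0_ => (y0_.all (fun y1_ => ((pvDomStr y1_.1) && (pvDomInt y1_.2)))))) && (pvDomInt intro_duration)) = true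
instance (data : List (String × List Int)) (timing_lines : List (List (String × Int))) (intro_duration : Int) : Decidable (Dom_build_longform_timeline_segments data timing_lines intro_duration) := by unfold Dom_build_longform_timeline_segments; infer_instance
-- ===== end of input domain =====

-- B fuses A's four loops (normalization pass plus three phased segment loops) into one streaming
-- pass over timing_lines, classifying each emitted segment by its position count instead of
-- materializing the normalized-range list (return value only; neither version mutates arguments).

-- ===== PORT A =====

-- d[k] for a Python dict modelled as an association list: first matching key.
def pvGet {α : Type} (d : List (String × α)) (k : String) : Option α :=
  (d.find? (fun p => p.1 == k)).map (·.2)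

-- Python round(m / d) for integers m, d > 0: ties go to the even integer.
-- Exact for the values reached here (m = (total-1)*step with |m| well below 2^53,
-- where the float quotient rounds to the same nearest integer and ties are exact halves).
def pvRoundDiv (m d : Int) : Int :=
  let q := PySem.Int.floordiv m d
  let r := m - d * q
  if 2 * r < d then q
  else if d < 2 * r then q + 1
  else if q % 2 = 0 then q else q + 1

def milestone_indices (total count : Int) : List Int :=
  if total ≤ count then PySem.List.pyRange 0 total 1
  else
    let raw : PySem.Set Int :=
      PySem.Set.ofList
        ([0, total - 1] ++
          (PySem.List.pyRange 0 count 1).map (fun step => pvRoundDiv ((total - 1) * step) (count - 1)))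
    PySem.List.sorted raw (fun x => x) false

-- KeyError when "frames" is missing is excluded by Pre_; the .getD [] is unreachable under it.
def build_longform_story_point_indices (data : List (String × List Int)) : List Int :=
  milestone_indices (((pvGet data "frames").getD []).length) 7

-- the transition loop of A, with its 'break' as early return of the tail
def pvTransitionLoop (normalized : List (List (String × Int))) (point_indices : List Int) :
    List Int → List (List (String × Int))
  | [] => []
  | t :: ts =>
    if (normalized.length : Int) ≤ 2 + t then []
    else
      let window := PySem.List.pyGetD normalized (2 + t) []
      [("startFrame", (pvGet window "startFrame").getD 0),
       ("endFrame", (pvGet window "endFrame").getD 0),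
       ("startIndex", PySem.List.pyGetD point_indices t 0),
       ("endIndex", PySem.List.pyGetD point_indices (t + 1) 0)] ::
        pvTransitionLoop normalized point_indices ts

def build_longform_timeline_segments (data : List (String × List Int)) (timing_lines : List (List (String × Int))) (intro_duration : Int) : List (List (String × Int)) :=
  let point_indices := build_longform_story_point_indices data
  if timing_lines = [] then []
  else
    let normalized := (timing_lines.foldl
      (fun (st : List (List (String × Int)) × Int) line =>
        let raw_end := max 0 ((pvGet line "endFrame").getD 0 - intro_duration)
        if raw_end ≤ st.2 then st
        else (st.1 ++ [[("startFrame", st.2), ("endFrame", raw_end)]], raw_end))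
      ([], 0)).1
    if normalized = [] then []
    else
      let opening_index := PySem.List.pyGetD point_indices 0 0
      let final_index := PySem.List.pyGetD point_indices (-1) 0
      let segments1 := (PySem.List.pyRange 0 (min 2 (normalized.length : Int)) 1).foldl
        (fun acc range_index =>
          let window := PySem.List.pyGetD normalized range_index []
          acc ++ [[("startFrame", (pvGet window "startFrame").getD 0),
                   ("endFrame", (pvGet window "endFrame").getD 0),
                   ("startIndex", opening_index), ("endIndex", opening_index)]]) []
      let transition_offset : Int := 2
      let transition_count := (point_indices.length : Int) - 1
      let segments2 := pvTransitionLoop normalized point_indices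
        (PySem.List.pyRange 0 transition_count 1)
      let segments3 := (PySem.List.pyRange (transition_offset + transition_count) (normalized.length : Int) 1).foldl
        (fun acc range_index =>
          let window := PySem.List.pyGetD normalized range_index []
          acc ++ [[("startFrame", (pvGet window "startFrame").getD 0),
                   ("endFrame", (pvGet window "endFrame").getD 0),
                   ("startIndex", final_index), ("endIndex", final_index)]]) []
      segments1 ++ segments2 ++ segments3

-- ===== PORT B =====

-- B's positional classification of the k-th emitted segment
def pvAssign (indices : List Int) (k : Nat) : Int × Int :=
  if (k : Int) < 2 then (PySem.List.pyGetD indices 0 0, PySem.List.pyGetD indices 0 0)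
  else if (k : Int) < 1 + (indices.length : Int) then
    (PySem.List.pyGetD indices ((k : Int) - 2) 0, PySem.List.pyGetD indices ((k : Int) - 1) 0)
  else (PySem.List.pyGetD indices (-1) 0, PySem.List.pyGetD indices (-1) 0)

def pvMkSeg (indices : List Int) (k : Nat) (s e : Int) : List (String × Int) :=
  let p := pvAssign indices k
  [("startFrame", s), ("endFrame", e), ("startIndex", p.1), ("endIndex", p.2)]

def build_longform_timeline_segments_alt (data : List (String × List Int)) (timing_lines : List (List (String × Int))) (intro_duration : Int) : List (List (String × Int)) :=
  let indices := build_longform_story_point_indices data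
  (timing_lines.foldl
    (fun (st : List (List (String × Int)) × Int) line =>
      let e := max 0 ((pvGet line "endFrame").getD 0 - intro_duration)
      if e > st.2 then (st.1 ++ [pvMkSeg indices st.1.length st.2 e], e) else st)
    ([], 0)).1

-- ===== PRECONDITION & SPEC =====
-- Pre_ excludes exactly the inputs where the Python A raises: a KeyError ("frames" missing,
-- or some timing line without "endFrame") or the IndexError point_indices[0] reached when
-- "frames" is empty while some line survives normalization.
def Pre_build_longform_timeline_segments (data : List (String × List Int)) (timing_lines : List (List (String × Int))) (intro_duration : Int) : Prop :=
  (pvGet data "frames").isSome = true ∧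
  (∀ line ∈ timing_lines, (pvGet line "endFrame").isSome = true) ∧
  ((pvGet data "frames").getD [] ≠ [] ∨
    ∀ line ∈ timing_lines, (pvGet line "endFrame").getD 0 ≤ intro_duration)
instance (data : List (String × List Int)) (timing_lines : List (List (String × Int))) (intro_duration : Int) : Decidable (Pre_build_longform_timeline_segments data timing_lines intro_duration) := by unfold Pre_build_longform_timeline_segments; infer_instance

def pvWitness_build_longform_timeline_segments : (List (String × List Int)) × (List (List (String × Int))) × Int :=
  ([("frames", [0, 1, 2])], ([[("endFrame", 5)], [("endFrame", 9)]], 1))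

def Spec_build_longform_timeline_segments (data : List (String × List Int)) (timing_lines : List (List (String × Int))) (intro_duration : Int) (out : List (List (String × Int))) : Prop := out = build_longform_timeline_segments_alt data timing_lines intro_duration
instance (data : List (String × List Int)) (timing_lines : List (List (String × Int))) (intro_duration : Int) (out : List (List (String × Int))) : Decidable (Spec_build_longform_timeline_segments data timing_lines intro_duration out) := by unfold Spec_build_longform_timeline_segments; infer_instance

-- ===== CLAIM (what is proved, stated in full; the proofs are below) =====
def Claim_equal_build_longform_timeline_segments : Prop := ∀ (data : List (String × List Int)) (timing_lines : List (List (String × Int))) (intro_duration : Int), Dom_build_longform_timeline_segments data timing_lines intro_duration → Pre_build_longform_timeline_segments data timing_lines intro_duration → Spec_build_longform_timeline_segments data timing_lines intro_duration (build_longform_timeline_segments data timing_lines intro_duration)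

-- ===== LEMMAS AND PROOFS =====

def pvToDict (p : Int × Int) : List (String × Int) := [("startFrame", p.1), ("endFrame", p.2)]

theorem pvGet_toDict_start (p : Int × Int) : (pvGet (pvToDict p) "startFrame").getD 0 = p.1 := rfl
theorem pvGet_toDict_end (p : Int × Int) : (pvGet (pvToDict p) "endFrame").getD 0 = p.2 := rfl

-- the normalization fold on (start,end) pairs
def pvPairFold (intro_duration : Int) (tl : List (List (String × Int))) (st : List (Int × Int) × Int) : List (Int × Int) × Int :=
  tl.foldl
    (fun (st : List (Int × Int) × Int) line =>
      let e := max 0 ((pvGet line "endFrame").getD 0 - intro_duration)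
      if e > st.2 then (st.1 ++ [(st.2, e)], e) else st)
    st

-- A's normalization fold builds the same ranges as pvPairFold, mapped to dicts
theorem norm_eq (intro_duration : Int) (tl : List (List (String × Int))) :
    ∀ (acc : List (Int × Int)) (prev : Int),
      tl.foldl
        (fun (st : List (List (String × Int)) × Int) line =>
          let raw_end := max 0 ((pvGet line "endFrame").getD 0 - intro_duration)
          if raw_end ≤ st.2 then st
          else (st.1 ++ [[("startFrame", st.2), ("endFrame", raw_end)]], raw_end))
        (acc.map pvToDict, prev)
      = ((pvPairFold intro_duration tl (acc, prev)).1.map pvToDict,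
         (pvPairFold intro_duration tl (acc, prev)).2) := by
  induction tl with
  | nil => intro acc prev; rfl
  | cons line tl ih =>
    intro acc prev
    simp only [pvPairFold, List.foldl_cons]
    by_cases h : max 0 ((pvGet line "endFrame").getD 0 - intro_duration) ≤ prev
    · rw [if_pos h, if_neg (by omega)]
      exact ih acc prev
    · rw [if_neg h, if_pos (by omega)]
      have := ih (acc ++ [(prev, max 0 ((pvGet line "endFrame").getD 0 - intro_duration))])
        (max 0 ((pvGet line "endFrame").getD 0 - intro_duration))
      simpa [pvToDict, pvPairFold] using this

-- pvPairFold only appends to its accumulator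
theorem pairFold_acc (intro_duration : Int) (tl : List (List (String × Int))) :
    ∀ (acc : List (Int × Int)) (prev : Int),
      pvPairFold intro_duration tl (acc, prev)
      = (acc ++ (pvPairFold intro_duration tl ([], prev)).1,
         (pvPairFold intro_duration tl ([], prev)).2) := by
  induction tl with
  | nil => intro acc prev; simp [pvPairFold]
  | cons line tl ih =>
    intro acc prev
    simp only [pvPairFold, List.foldl_cons]
    by_cases h : max 0 ((pvGet line "endFrame").getD 0 - intro_duration) > prev
    · rw [if_pos h, if_pos h]
      have h1 := ih (acc ++ [(prev, max 0 ((pvGet line "endFrame").getD 0 - intro_duration))])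
        (max 0 ((pvGet line "endFrame").getD 0 - intro_duration))
      have h2 := ih [(prev, max 0 ((pvGet line "endFrame").getD 0 - intro_duration))]
        (max 0 ((pvGet line "endFrame").getD 0 - intro_duration))
      simp only [pvPairFold] at h1 h2
      simp only [List.nil_append]
      rw [h1, h2]
      simp
    · rw [if_neg h, if_neg h]
      exact ih acc prev

-- B's fused fold emits exactly the normalized ranges, classified by their position
theorem fuseB (indices : List Int) (intro_duration : Int) (tl : List (List (String × Int))) :
    ∀ (segs : List (List (String × Int))) (prev : Int),
      (tl.foldl
        (fun (st : List (List (String × Int)) × Int) line =>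
          let e := max 0 ((pvGet line "endFrame").getD 0 - intro_duration)
          if e > st.2 then (st.1 ++ [pvMkSeg indices st.1.length st.2 e], e) else st)
        (segs, prev)).1
      = segs ++ ((pvPairFold intro_duration tl ([], prev)).1.zipIdx segs.length).map
          (fun pk => pvMkSeg indices pk.2 pk.1.1 pk.1.2) := by
  induction tl with
  | nil => intro segs prev; simp [pvPairFold]
  | cons line tl ih =>
    intro segs prev
    simp only [pvPairFold, List.foldl_cons]
    by_cases h : max 0 ((pvGet line "endFrame").getD 0 - intro_duration) > prev
    · rw [if_pos h, if_pos h]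
      have hfold := pairFold_acc intro_duration tl
        [(prev, max 0 ((pvGet line "endFrame").getD 0 - intro_duration))]
        (max 0 ((pvGet line "endFrame").getD 0 - intro_duration))
      simp only [pvPairFold] at hfold
      rw [ih (segs ++ [pvMkSeg indices segs.length prev
            (max 0 ((pvGet line "endFrame").getD 0 - intro_duration))])
          (max 0 ((pvGet line "endFrame").getD 0 - intro_duration))]
      simp only [List.nil_append]
      rw [hfold]
      simp only [List.zipIdx_cons, List.map_cons, List.length_append, List.length_cons,
        List.length_nil, List.append_assoc, List.cons_append, List.nil_append,
        Nat.zero_add]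
      rfl
    · rw [if_neg h, if_neg h]
      exact ih segs prev

-- if every endFrame is at most intro_duration, the normalization keeps its state
theorem norm_stays (intro_duration : Int) (tl : List (List (String × Int))) :
    ∀ (acc : List (Int × Int)) (prev : Int), 0 ≤ prev →
      (∀ line ∈ tl, (pvGet line "endFrame").getD 0 ≤ intro_duration) →
      pvPairFold intro_duration tl (acc, prev) = (acc, prev) := by
  induction tl with
  | nil => intro acc prev _ _; rfl
  | cons line tl ih =>
    intro acc prev hprev hall
    have h1 : (pvGet line "endFrame").getD 0 ≤ intro_duration := hall line (by simp)
    simp only [pvPairFold, List.foldl_cons]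
    rw [if_neg (by omega)]
    exact ih acc prev hprev (fun l hl => hall l (by simp [hl]))

theorem milestone_ne_nil (total : Int) (h : 0 < total) : milestone_indices total 7 ≠ [] := by
  unfold milestone_indices
  split
  · intro hnil
    have := PySem.List.length_pyRange_one 0 total
    rw [hnil] at this
    simp at this
    omega
  · intro hnil
    have h0 : (0 : Int) ∈ PySem.List.sorted
        (PySem.Set.ofList
          ([0, total - 1] ++
            (PySem.List.pyRange 0 7 1).map (fun step => pvRoundDiv ((total - 1) * step) (7 - 1))))
        (fun x => x) false := by
      rw [PySem.List.mem_sorted, PySem.Set.mem_ofList]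
      simp
    rw [hnil] at h0
    simp at h0

-- the transition loop with break, over a range, is a map over the trimmed range
theorem transLoop_eq (normalized : List (List (String × Int))) (point_indices : List Int) :
    ∀ (a b : Int),
      pvTransitionLoop normalized point_indices (PySem.List.pyRange a b 1)
      = (PySem.List.pyRange a (min b ((normalized.length : Int) - 2)) 1).map
          (fun t =>
            let window := PySem.List.pyGetD normalized (2 + t) []
            [("startFrame", (pvGet window "startFrame").getD 0),
             ("endFrame", (pvGet window "endFrame").getD 0),
             ("startIndex", PySem.List.pyGetD point_indices t 0),
             ("endIndex", PySem.List.pyGetD point_indices (t + 1) 0)]) := by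
  intro a b
  induction hfuel : (b - a).toNat generalizing a with
  | zero =>
    have hba : b ≤ a := by omega
    rw [PySem.List.pyRange_one_eq_nil hba, PySem.List.pyRange_one_eq_nil (by omega)]
    rfl
  | succ n ih =>
    have hab : a < b := by omega
    by_cases hbreak : (normalized.length : Int) ≤ 2 + a
    · rw [PySem.List.pyRange_one_cons hab]
      simp only [pvTransitionLoop, if_pos hbreak]
      rw [PySem.List.pyRange_one_eq_nil (by rw [min_le_iff]; right; omega)]
      rfl
    · rw [PySem.List.pyRange_one_cons hab]
      simp only [pvTransitionLoop, if_neg hbreak]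
      rw [PySem.List.pyRange_one_cons (lt_min hab (by omega)), List.map_cons]
      refine congrArg₂ List.cons rfl ?_
      rw [ih (a + 1) (by omega)]

theorem window_atN (rs : List (Int × Int)) (i : Nat) (h : i < rs.length) :
    PySem.List.pyGetD (List.map pvToDict rs) (i : Int) [] = pvToDict rs[i] := by
  rw [PySem.List.pyGetD_eq_getElem _ _ (by omega) (by simpa using h)]
  simp

-- main combinatorial lemma: A's three phased loops equal B's position-classified emission
theorem main_seg (rs : List (Int × Int)) (pis : List Int) (hp : rs ≠ [] → pis ≠ []) :
    (if rs.map pvToDict = [] then ([] : List (List (String × Int)))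
     else
      let normalized := rs.map pvToDict
      let opening_index := PySem.List.pyGetD pis 0 0
      let final_index := PySem.List.pyGetD pis (-1) 0
      let segments1 := (PySem.List.pyRange 0 (min 2 (normalized.length : Int)) 1).foldl
        (fun acc range_index =>
          let window := PySem.List.pyGetD normalized range_index []
          acc ++ [[("startFrame", (pvGet window "startFrame").getD 0),
                   ("endFrame", (pvGet window "endFrame").getD 0),
                   ("startIndex", opening_index), ("endIndex", opening_index)]]) []
      let transition_offset : Int := 2
      let transition_count := (pis.length : Int) - 1
      let segments2 := pvTransitionLoop normalized pis (PySem.List.pyRange 0 transition_count 1)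
      let segments3 := (PySem.List.pyRange (transition_offset + transition_count) (normalized.length : Int) 1).foldl
        (fun acc range_index =>
          let window := PySem.List.pyGetD normalized range_index []
          acc ++ [[("startFrame", (pvGet window "startFrame").getD 0),
                   ("endFrame", (pvGet window "endFrame").getD 0),
                   ("startIndex", final_index), ("endIndex", final_index)]]) []
      segments1 ++ segments2 ++ segments3)
    = (rs.zipIdx 0).map (fun pk => pvMkSeg pis pk.2 pk.1.1 pk.1.2) := by
  by_cases hrs : rs = []
  · subst hrs; simp
  · rw [if_neg (by simpa using hrs)]
    have hk : pis ≠ [] := hp hrs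
    have hk1 : 0 < pis.length := List.length_pos_iff.mpr hk
    have hn1 : 0 < rs.length := List.length_pos_iff.mpr hrs
    simp only [PySem.List.foldl_append_singleton_eq_map, transLoop_eq, List.nil_append,
      List.length_map]
    apply List.ext_getElem
    · simp only [List.length_append, List.length_map, List.length_zipIdx,
        PySem.List.length_pyRange_one]
      omega
    · intro i h1 h2
      simp only [List.length_append, List.length_map, List.length_zipIdx,
        PySem.List.length_pyRange_one] at h1 h2
      simp only [List.getElem_append, List.getElem_map, List.getElem_zipIdx,
        PySem.List.getElem_pyRange_one, List.length_map, List.length_append, PySem.List.length_pyRange_one]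
      split_ifs with hA hB
      · -- opening region: i < min 2 rs.length
        rw [show ((0 : Int) + (i : Int)) = (i : Int) from by omega,
            window_atN rs i (by omega), pvGet_toDict_start, pvGet_toDict_end]
        simp only [pvMkSeg, pvAssign, Nat.zero_add]
        rw [if_pos (by omega : ((i : Nat) : Int) < 2)]
      · -- transition region
        rw [show (2 + ((0 : Int) + ((i - (min 2 (rs.length : Int) - 0).toNat : Nat) : Int))) = (i : Int) from by omega,
            window_atN rs i (by omega), pvGet_toDict_start, pvGet_toDict_end]
        simp only [pvMkSeg, pvAssign, Nat.zero_add]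
        have hreg : (i : Int) - (min 2 (rs.length : Int) - 0).toNat
            < min ((pis.length : Int) - 1) ((rs.length : Int) - 2) - 0 := by
          push_cast at hB ⊢
          omega
        have hmin2 : (min 2 (rs.length : Int) - 0).toNat = 2 := by omega
        rw [if_neg (by omega : ¬ ((i : Nat) : Int) < 2),
            if_pos (by omega : ((i : Nat) : Int) < 1 + (pis.length : Int))]
        rw [show ((0 : Int) + ((i - (min 2 (rs.length : Int) - 0).toNat : Nat) : Int)) = (i : Int) - 2 from by omega,
            show ((i : Int) - 2 + 1) = (i : Int) - 1 from by omega]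
      · -- final region
        have hlen2 : (min 2 (rs.length : Int) - 0).toNat
            + (min ((pis.length : Int) - 1) ((rs.length : Int) - 2) - 0).toNat ≤ i := by omega
        rw [show (2 + ((pis.length : Int) - 1) + ((i - ((min 2 (rs.length : Int) - 0).toNat + (min ((pis.length : Int) - 1) ((rs.length : Int) - 2) - 0).toNat) : Nat) : Int)) = (i : Int) from by omega,
            window_atN rs i (by omega), pvGet_toDict_start, pvGet_toDict_end]
        simp only [pvMkSeg, pvAssign, Nat.zero_add]
        rw [if_neg (by omega : ¬ ((i : Nat) : Int) < 2),
            if_neg (by omega : ¬ ((i : Nat) : Int) < 1 + (pis.length : Int))]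

-- ===== VERDICT (by name: the statement is the Claim_ definition above) =====
theorem build_longform_timeline_segments_spec : Claim_equal_build_longform_timeline_segments := by
  intro data timing_lines intro_duration _hdom hpre
  obtain ⟨hfr, hlines, hdisj⟩ := hpre
  unfold Spec_build_longform_timeline_segments
  unfold build_longform_timeline_segments build_longform_timeline_segments_alt
  by_cases htl : timing_lines = []
  · subst htl; simp
  · simp only []
    rw [if_neg htl]
    have h0 := norm_eq intro_duration timing_lines [] 0
    simp only [List.map_nil] at h0
    rw [h0]
    rw [fuseB (build_longform_story_point_indices data) intro_duration timing_lines [] 0]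
    simp only [List.nil_append, List.length_nil]
    refine main_seg _ (build_longform_story_point_indices data) ?_
    intro hrs
    rcases hdisj with hfr0 | hall
    · unfold build_longform_story_point_indices
      exact milestone_ne_nil _ (by
        have : 0 < ((pvGet data "frames").getD []).length := List.length_pos_iff.mpr hfr0
        omega)
    · exact absurd (by rw [norm_stays intro_duration timing_lines [] 0 le_rfl hall]) hrs
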